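-- pv_equiv track=rewrite | github.com/akhandsingh17/assignments | codingexercise/MaxConsecRepeatingChar.py | MaxConsecRepeatingChar
-- ===== SOURCE A (Python) =====
-- def MaxConsecRepeatingChar(str):
--
--     curr_chr=str[0]
--     prev_chr=str[0]
--     max_cnt=0
--     max_chr=''
--     cnt=0
--
--     for i in range(0,len(str)):
--
--         curr_chr=str[i]
--         if curr_chr!=prev_chr:
--             if cnt>max_cnt:
--                 max_cnt=cnt
--                 max_chr=prev_chr
--             cnt=1
--         else:
--             cnt=cnt+1
--         prev_chr=curr_chr
--     if cnt>max_cnt: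
--         max_cnt=cnt
--         max_chr=prev_chr
--     return max_chr
-- ===== SOURCE B (Python) =====
-- def MaxConsecRepeatingChar(str):
--     # Pass 1: materialize the maximal runs of equal characters.
--     runs = []
--     for ch in str:
--         if runs and runs[-1][0] == ch:
--             runs[-1] = (ch, runs[-1][1] + 1)
--         else:
--             runs.append((ch, 1))
--     # Pass 2: first run with strictly maximal length wins.
--     best_chr, best_cnt = '', 0
--     for c, n in runs:
--         if n > best_cnt:
--             best_chr, best_cnt = c, n
--     return best_chr
-- ===== Notes on version B (the rewrite author's own statement) =====
-- stated objective: alternative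
-- what changed: B materializes the list of maximal equal-character runs in one pass and then does a separate first-max scan over the runs, replacing A's single fused scan that interleaves run tracking with max bookkeeping in five state variables.
import Mathlib
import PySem

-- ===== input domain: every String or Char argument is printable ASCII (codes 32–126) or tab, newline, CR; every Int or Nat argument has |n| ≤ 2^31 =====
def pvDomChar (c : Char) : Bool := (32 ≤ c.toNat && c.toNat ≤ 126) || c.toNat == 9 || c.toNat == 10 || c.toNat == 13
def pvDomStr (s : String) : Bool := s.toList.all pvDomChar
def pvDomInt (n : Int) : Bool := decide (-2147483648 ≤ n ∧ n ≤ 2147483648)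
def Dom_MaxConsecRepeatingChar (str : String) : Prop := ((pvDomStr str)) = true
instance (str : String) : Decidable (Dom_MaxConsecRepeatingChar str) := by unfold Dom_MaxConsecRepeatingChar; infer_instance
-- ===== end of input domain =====

-- B replaces A's fused five-variable scan by a run-list pass plus a separate first-max scan (same cost, different decomposition).

-- ===== PORT A =====
-- loop body of A: state = (curr_chr, prev_chr, max_cnt, max_chr, cnt)
def pvStepA (s : Char × Char × Nat × String × Nat) (curr : Char) : Char × Char × Nat × String × Nat :=
  let (_, prev, maxCnt, maxChr, cnt) := s
  if curr ≠ prev then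
    if cnt > maxCnt then (curr, curr, cnt, String.ofList [prev], 1)
    else (curr, curr, maxCnt, maxChr, 1)
  else (curr, curr, maxCnt, maxChr, cnt + 1)

def MaxConsecRepeatingChar (str : String) : String :=
  match str.toList with
  | [] => ""   -- unreachable under Pre_: str[0] raises IndexError on the empty string
  | c0 :: _ =>
    let st := str.toList.foldl pvStepA (c0, c0, 0, "", 0)
    let (_, prev, maxCnt, maxChr, cnt) := st
    if cnt > maxCnt then String.ofList [prev] else maxChr

-- ===== PORT B =====
-- pass 1 body: extend the run list by one character
def pvRunStep (rs : List (Char × Nat)) (ch : Char) : List (Char × Nat) :=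
  match rs.getLast? with
  | some (c, n) => if c == ch then rs.dropLast ++ [(ch, n + 1)] else rs ++ [(ch, 1)]
  | none => [(ch, 1)]

-- pass 2 body: first strictly-maximal run wins; state = (best_chr, best_cnt)
def pvBestStep (s : String × Nat) (p : Char × Nat) : String × Nat :=
  if p.2 > s.2 then (String.ofList [p.1], p.2) else s

def MaxConsecRepeatingChar_alt (str : String) : String :=
  let runs := str.toList.foldl pvRunStep []
  (runs.foldl pvBestStep ("", 0)).1

-- ===== PRECONDITION & SPEC =====
-- Pre_ excludes only the empty string, on which A raises IndexError at str[0].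
def Pre_MaxConsecRepeatingChar (str : String) : Prop := str ≠ ""
instance (str : String) : Decidable (Pre_MaxConsecRepeatingChar str) := by unfold Pre_MaxConsecRepeatingChar; infer_instance
def pvWitness_MaxConsecRepeatingChar : String := "aabbba"

def Spec_MaxConsecRepeatingChar (str : String) (out : String) : Prop := out = MaxConsecRepeatingChar_alt str
instance (str : String) (out : String) : Decidable (Spec_MaxConsecRepeatingChar str out) := by unfold Spec_MaxConsecRepeatingChar; infer_instance

-- ===== CLAIM (what is proved, stated in full; the proofs are below) =====
def Claim_equal_MaxConsecRepeatingChar : Prop := ∀ (str : String), Dom_MaxConsecRepeatingChar str → Pre_MaxConsecRepeatingChar str → Spec_MaxConsecRepeatingChar str (MaxConsecRepeatingChar str)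

-- ===== LEMMAS AND PROOFS =====

-- one B run-pass step on a run list with explicit last run
theorem pvRunStep_concat (rsI : List (Char × Nat)) (prev : Char) (cnt : Nat) (c : Char) :
    pvRunStep (rsI ++ [(prev, cnt)]) c =
      if prev = c then rsI ++ [(c, cnt + 1)] else (rsI ++ [(prev, cnt)]) ++ [(c, 1)] := by
  simp only [pvRunStep, List.getLast?_concat, List.dropLast_concat]
  by_cases h : prev = c <;> simp [h]

-- invariant linking A's fold state to B's run list while scanning the same suffix
theorem pvKey (cs : List Char) :
    ∀ (rsI : List (Char × Nat)) (prev : Char) (cnt : Nat),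
      ∃ rsI' prev' cnt',
        cs.foldl pvRunStep (rsI ++ [(prev, cnt)]) = rsI' ++ [(prev', cnt')] ∧
        cs.foldl pvStepA (prev, prev, (rsI.foldl pvBestStep ("", 0)).2, (rsI.foldl pvBestStep ("", 0)).1, cnt)
          = (prev', prev', (rsI'.foldl pvBestStep ("", 0)).2, (rsI'.foldl pvBestStep ("", 0)).1, cnt') := by
  induction cs with
  | nil => intro rsI prev cnt; exact ⟨rsI, prev, cnt, rfl, rfl⟩
  | cons c cs ih =>
    intro rsI prev cnt
    by_cases h : prev = c
    · obtain ⟨rsI', prev', cnt', h1, h2⟩ := ih rsI c (cnt + 1)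
      refine ⟨rsI', prev', cnt', ?_, ?_⟩
      · simpa [List.foldl_cons, pvRunStep_concat, h] using h1
      · simpa [List.foldl_cons, pvStepA, h] using h2
    · obtain ⟨rsI', prev', cnt', h1, h2⟩ := ih (rsI ++ [(prev, cnt)]) c 1
      refine ⟨rsI', prev', cnt', ?_, ?_⟩
      · simpa [List.foldl_cons, pvRunStep_concat, h] using h1
      · have hb : ((rsI ++ [(prev, cnt)]).foldl pvBestStep ("", 0))
            = pvBestStep (rsI.foldl pvBestStep ("", 0)) (prev, cnt) := by
          simp [List.foldl_append]
        rw [List.foldl_cons]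
        have hstep : pvStepA (prev, prev, (rsI.foldl pvBestStep ("", 0)).2, (rsI.foldl pvBestStep ("", 0)).1, cnt) c
            = (c, c, ((rsI ++ [(prev, cnt)]).foldl pvBestStep ("", 0)).2,
                ((rsI ++ [(prev, cnt)]).foldl pvBestStep ("", 0)).1, 1) := by
          rw [hb]
          simp [pvStepA, pvBestStep, Ne.symm h]
          split_ifs <;> simp
        rw [hstep]; exact h2

theorem MaxConsecRepeatingChar_eq_alt (str : String) (h : str ≠ "") :
    MaxConsecRepeatingChar str = MaxConsecRepeatingChar_alt str := by
  have hne : str.toList ≠ [] := by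
    intro hc
    have h2 := congrArg String.ofList hc
    rw [String.ofList_toList] at h2
    exact h h2
  obtain ⟨c0, rest, hcs⟩ := List.exists_cons_of_ne_nil hne
  obtain ⟨rsI', prev', cnt', h1, h2⟩ := pvKey rest [] c0 1
  have hfoldA : str.toList.foldl pvStepA (c0, c0, 0, "", 0)
      = (prev', prev', (rsI'.foldl pvBestStep ("", 0)).2, (rsI'.foldl pvBestStep ("", 0)).1, cnt') := by
    rw [hcs, List.foldl_cons]
    have : pvStepA (c0, c0, 0, "", 0) c0 = (c0, c0, 0, "", 1) := by simp [pvStepA]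
    rw [this]
    simpa using h2
  have hfoldB : str.toList.foldl pvRunStep [] = rsI' ++ [(prev', cnt')] := by
    rw [hcs, List.foldl_cons]
    have : pvRunStep [] c0 = [(c0, 1)] := by simp [pvRunStep]
    rw [this]
    simpa using h1
  unfold MaxConsecRepeatingChar MaxConsecRepeatingChar_alt
  rw [hcs] at hfoldA hfoldB ⊢
  simp only [hfoldA, hfoldB, List.foldl_append]
  simp [pvBestStep]
  split_ifs <;> simp

-- ===== VERDICT (by name: the statement is the Claim_ definition above) =====
theorem MaxConsecRepeatingChar_spec : Claim_equal_MaxConsecRepeatingChar := by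
  intro str _ hpre
  exact MaxConsecRepeatingChar_eq_alt str hpre
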